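-- pv_equiv track=rewrite | github.com/JeonggonCho/Algorithm | 프로그래머스/lv0/120834. 외계행성의 나이/외계행성의 나이.py | solution
-- ===== SOURCE A (Python) =====
-- def solution(age):
--     answer = ''
--     alpha_num = {}
--     for i in range(97, 123):
--         alpha_num[i-97] = chr(i)
--     for j in str(age):
--         answer += alpha_num[int(j)]
--     return answer
-- ===== SOURCE B (Python) =====
-- def solution(age):
--     if age == 0:
--         return 'a'
--     letters = []
--     while age > 0:
--         age, d = divmod(age, 10)
--         letters.append(chr(97 + d))
--     letters.reverse()
--     return ''.join(letters)
-- ===== Notes on version B (the rewrite author's own statement) =====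
-- stated objective: alternative
-- what changed: Replaces A's string conversion plus per-character dict lookup with pure arithmetic: digits are extracted by repeated divmod(age, 10) least-significant first, collected as letters, and the list is reversed at the end; no str(age), no int(c), no lookup table.
import Mathlib
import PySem

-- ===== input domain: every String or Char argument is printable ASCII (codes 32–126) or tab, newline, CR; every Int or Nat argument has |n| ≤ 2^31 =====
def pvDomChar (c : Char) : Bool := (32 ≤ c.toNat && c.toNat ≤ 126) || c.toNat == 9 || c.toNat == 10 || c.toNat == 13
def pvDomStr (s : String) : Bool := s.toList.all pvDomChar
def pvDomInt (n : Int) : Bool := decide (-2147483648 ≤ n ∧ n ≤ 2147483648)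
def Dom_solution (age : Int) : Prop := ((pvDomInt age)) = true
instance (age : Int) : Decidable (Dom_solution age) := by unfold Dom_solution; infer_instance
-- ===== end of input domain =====

-- B replaces A's str(age) + per-character dict lookup with pure arithmetic:
-- repeated divmod(age, 10) collects letters least-significant first, then reverses (alternative).

-- ===== PORT A =====
-- A's dict: alpha_num[i-97] = chr(i) for i in range(97, 123); chr ported as Char.ofNat (exact for 97..122)
def alphaNumA : PySem.Dict Int String :=
  (PySem.List.pyRange 97 123 1).foldl
    (fun d i => PySem.Dict.insert d (i - 97) (String.ofList [Char.ofNat i.toNat])) (PySem.Dict.mk [])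

-- answer += alpha_num[int(j)]; int(j) failing (ValueError) and a missing key (KeyError)
-- cannot occur under Pre_solution — the port leaves answer unchanged on those none branches.
def solution (age : Int) : String :=
  String.ofList ((PySem.Int.toStr age).toList.foldl
    (fun answer j =>
      match PySem.Int.ofStr? (String.ofList [j]) with
      | none => answer
      | some n =>
        match PySem.Dict.get? alphaNumA n with
        | none => answer
        | some s => answer ++ s.toList) [])

-- ===== PORT B =====
-- the while loop: age, d = divmod(age, 10); letters.append(chr(97 + d))
def bLoop (n : Int) (acc : List Char) : List Char :=
  if 0 < n then
    bLoop (PySem.Int.floordiv n 10) (acc ++ [Char.ofNat (97 + PySem.Int.mod n 10).toNat])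
  else acc
  termination_by n.toNat
  decreasing_by
    simp only [PySem.Int.floordiv]
    rename_i h
    rw [Int.fdiv_eq_ediv, if_pos (Or.inl (by omega : (0:Int) ≤ 10))]
    omega

def solution_alt (age : Int) : String :=
  if age = 0 then "a"
  else String.ofList ((bLoop age []).reverse)

-- ===== PRECONDITION & SPEC =====
-- Pre_ excludes negative ages: there str(age) starts with '-' and Python A raises ValueError at int('-').
def Pre_solution (age : Int) : Prop := 0 ≤ age
instance (age : Int) : Decidable (Pre_solution age) := by unfold Pre_solution; infer_instance
def pvWitness_solution : Int := (23)

def Spec_solution (age : Int) (out : String) : Prop := out = solution_alt age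
instance (age : Int) (out : String) : Decidable (Spec_solution age out) := by unfold Spec_solution; infer_instance

-- ===== CLAIM =====
def Claim_equal_solution : Prop := ∀ (age : Int), Dom_solution age → Pre_solution age → Spec_solution age (solution age)

-- ===== LEMMAS AND PROOFS =====

-- A's per-character contribution, named for the proofs
def aStep (c : Char) : List Char :=
  match PySem.Int.ofStr? (String.ofList [c]) with
  | none => []
  | some n => [Char.ofNat (97 + n).toNat]

-- B's letter for one digit char
def hFun (c : Char) : Char := Char.ofNat (97 + (c.toNat - 48))

-- least-significant-first decimal digit chars of m
def repD (m : Nat) : List Char :=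
  if 0 < m then Nat.digitChar (m % 10) :: repD (m / 10) else []
  termination_by m
  decreasing_by exact Nat.div_lt_self (by omega) (by omega)

-- least-significant-first letters of m (what B's while loop produces)
def repL (m : Nat) : List Char :=
  if 0 < m then Char.ofNat (97 + m % 10) :: repL (m / 10) else []
  termination_by m
  decreasing_by exact Nat.div_lt_self (by omega) (by omega)

theorem char_digit_mem (c : Char) (hc : c.isDigit = true) :
    c ∈ ['0','1','2','3','4','5','6','7','8','9'] := by
  have h1 : 48 ≤ c.toNat ∧ c.toNat ≤ 57 := by
    simpa [Char.isDigit, Char.le_def, decide_eq_true_eq] using hc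
  obtain ⟨h48, h57⟩ := h1
  interval_cases h : c.toNat
  · simp [show c = '0' from Char.ext (UInt32.toNat_inj.mp h)]
  · simp [show c = '1' from Char.ext (UInt32.toNat_inj.mp h)]
  · simp [show c = '2' from Char.ext (UInt32.toNat_inj.mp h)]
  · simp [show c = '3' from Char.ext (UInt32.toNat_inj.mp h)]
  · simp [show c = '4' from Char.ext (UInt32.toNat_inj.mp h)]
  · simp [show c = '5' from Char.ext (UInt32.toNat_inj.mp h)]
  · simp [show c = '6' from Char.ext (UInt32.toNat_inj.mp h)]
  · simp [show c = '7' from Char.ext (UInt32.toNat_inj.mp h)]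
  · simp [show c = '8' from Char.ext (UInt32.toNat_inj.mp h)]
  · simp [show c = '9' from Char.ext (UInt32.toNat_inj.mp h)]

-- on a digit character, A's dict-lookup step appends exactly aStep c
theorem digit_step (c : Char) (hc : c.isDigit = true) (acc : List Char) :
    (match PySem.Int.ofStr? (String.ofList [c]) with
      | none => acc
      | some n =>
        match PySem.Dict.get? alphaNumA n with
        | none => acc
        | some s => acc ++ s.toList)
    = acc ++ aStep c := by
  have hm := char_digit_mem c hc
  fin_cases hm <;> rfl

theorem fold_eq (cs : List Char) : ∀ acc : List Char, (∀ c ∈ cs, c.isDigit = true) →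
    cs.foldl
      (fun answer j =>
        match PySem.Int.ofStr? (String.ofList [j]) with
        | none => answer
        | some n =>
          match PySem.Dict.get? alphaNumA n with
          | none => answer
          | some s => answer ++ s.toList) acc
    = acc ++ (cs.map aStep).flatten := by
  induction cs with
  | nil => intro acc _; simp
  | cons c cs ih =>
    intro acc hcs
    simp only [List.foldl_cons, List.map_cons, List.flatten_cons]
    rw [ih _ (fun x hx => hcs x (List.mem_cons_of_mem _ hx)),
        digit_step c (hcs c List.mem_cons_self) acc, List.append_assoc]

-- on digit chars, A's pieces are singletons: flatten(map aStep) = map hFun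
theorem flatten_aStep (l : List Char) (hl : ∀ c ∈ l, c.isDigit = true) :
    (l.map aStep).flatten = l.map hFun := by
  induction l with
  | nil => rfl
  | cons c cs ih =>
    simp only [List.map_cons, List.flatten_cons]
    rw [ih (fun x hx => hl x (List.mem_cons_of_mem _ hx))]
    have hm := char_digit_mem c (hl c List.mem_cons_self)
    fin_cases hm <;> rfl

theorem toChars_digits (age : Int) (h : 0 ≤ age) :
    ∀ c ∈ (PySem.Int.toStr age).toList, c.isDigit = true := by
  intro c hc
  rw [PySem.Int.toList_toStr] at hc
  unfold PySem.Int.toChars at hc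
  rw [if_neg (by omega)] at hc
  exact Nat.isDigit_of_mem_toDigits (by omega) (by omega) hc

-- Nat.toDigitsCore written as the reverse of the lsf digit list
theorem toDigitsCore_eq (fuel : Nat) : ∀ m ds, 0 < m → m < fuel →
    Nat.toDigitsCore 10 fuel m ds = (repD m).reverse ++ ds := by
  induction fuel with
  | zero => intro m ds hm hf; omega
  | succ f ih =>
    intro m ds hm hf
    simp only [Nat.toDigitsCore]
    rw [repD, if_pos hm]
    by_cases h10 : m / 10 = 0
    · simp [h10, repD]
    · rw [if_neg h10, ih (m / 10) _ (by omega) (by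
        have := Nat.div_lt_self hm (by omega : (1:Nat) < 10); omega)]
      simp

theorem toDigits_eq (m : Nat) (hm : 0 < m) :
    Nat.toDigits 10 m = (repD m).reverse := by
  unfold Nat.toDigits
  rw [toDigitsCore_eq (m + 1) m [] hm (by omega)]
  simp

-- hFun on a digit char computes the letter directly
theorem hFun_digitChar (d : Nat) (hd : d < 10) :
    hFun (Nat.digitChar d) = Char.ofNat (97 + d) := by
  interval_cases d <;> decide

theorem map_hFun_repD (m : Nat) : (repD m).map hFun = repL m := by
  induction m using Nat.strong_induction_on with
  | _ m ih =>
    rw [repD, repL]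
    by_cases hm : 0 < m
    · rw [if_pos hm, if_pos hm, List.map_cons,
          hFun_digitChar (m % 10) (Nat.mod_lt _ (by omega)),
          ih (m / 10) (Nat.div_lt_self hm (by omega))]
    · rw [if_neg hm, if_neg hm]; rfl

theorem bLoop_eq (m : Nat) : ∀ acc : List Char,
    bLoop (m : Int) acc = acc ++ repL m := by
  induction m using Nat.strong_induction_on with
  | _ m ih =>
    intro acc
    rw [bLoop, repL]
    by_cases hm : 0 < m
    · have hdiv : PySem.Int.floordiv (m : Int) 10 = ((m / 10 : Nat) : Int) := by
        simp only [PySem.Int.floordiv]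
        rw [Int.fdiv_eq_ediv, if_pos (Or.inl (by omega : (0:Int) ≤ 10))]
        omega
      have hmod : (97 + PySem.Int.mod (m : Int) 10).toNat = 97 + m % 10 := by
        simp only [PySem.Int.mod]
        rw [Int.fmod_eq_emod, if_pos (Or.inl (by omega : (0:Int) ≤ 10))]
        omega
      rw [if_pos (by exact_mod_cast hm), if_pos hm, hdiv, hmod,
          ih (m / 10) (Nat.div_lt_self hm (by omega))]
      simp
    · rw [if_neg (by exact_mod_cast hm), if_neg hm]
      simp

-- ===== VERDICT =====
theorem solution_spec : Claim_equal_solution := by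
  intro age _ hpre
  unfold Spec_solution
  by_cases h0 : age = 0
  · subst h0; decide
  · have hm : 0 < age.toNat := by unfold Pre_solution at hpre; omega
    have hcast : ((age.toNat : Int)) = age := by unfold Pre_solution at hpre; omega
    unfold solution solution_alt
    rw [if_neg h0]
    rw [fold_eq _ _ (toChars_digits age (by unfold Pre_solution at hpre; exact hpre))]
    rw [PySem.Int.toList_toStr]
    unfold PySem.Int.toChars
    rw [if_neg (by unfold Pre_solution at hpre; omega)]
    rw [flatten_aStep _ (fun c hc => Nat.isDigit_of_mem_toDigits (by omega) (by omega) hc)]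
    rw [toDigits_eq age.toNat hm, List.map_reverse, map_hFun_repD]
    rw [← hcast, bLoop_eq age.toNat []]
    have hmax : (max age 0).toNat = age.toNat := by omega
    simp [hmax]
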